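-- pv_equiv track=rewrite | github.com/GeeTransit/mathtermind-solver | mathtermind_solver.py | pool_split
-- ===== SOURCE A (Python) =====
-- from collections import Counter, defaultdict
-- from typing import Optional, Any, List, Mapping, Collection
--
-- Ints = Collection[int]
--
-- def nums_matching(triplet: Ints = (), nums: Ints = ()):
--     """Return nums matching the given triplet
--
--     Arguments:
--         triplet: the possible triplet to match against
--         nums: the numbers being guessed
--
--     Returns:
--         amount of triplet numbers matching the guess numbers
--
--     Example:
--         >>> nums_matching(triplet=[1, 2, 3], nums=[1])
--         1
--         >>> nums_matching(triplet=[1, 2, 3], nums=[1, 2])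
--         2
--         >>> nums_matching(triplet=[1, 2, 3], nums=[1, 2, 3])
--         3
--         >>> nums_matching(triplet=[1, 2, 3], nums=[1, 4])
--         1
--         >>> nums_matching(triplet=[1, 2, 3], nums=[4, 5])
--         0
--
--     """
--     return sum(num in nums for num in triplet)
--
-- def pool_split(
--     pool: Collection[Ints] = (),
--     nums: Ints = (),
-- ) -> Mapping[int, Collection[Ints]]:
--     """Return a dict with pools for each possible nums matching
--
--     Arguments:
--         pool: possible triplets at this point
--         nums: the numbers being guessed
--
--     Returns:
--         mapping from nums matching to the matching list of triplets
--
--     Example: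
--         >>> pool = [(1, 2), (1, 3)]
--         >>> pool_split(pool=pool, nums=[1, 2])
--         {2: [(1, 2)], 1: [(1, 3)]}
--         >>> pool_split(pool=pool, nums=[2])
--         {1: [(1, 2)], 0: [(1, 3)]}
--         >>> pool_split(pool=pool, nums=[1])
--         {1: [(1, 2), (1, 3)]}
--         >>> pool_split(pool=pool, nums=[4])
--         {0: [(1, 2), (1, 3)]}
--
--     """
--     result = defaultdict(list)
--     for triplet in pool:
--         result[nums_matching(triplet=triplet, nums=nums)].append(triplet)
--     return dict(result)
-- ===== SOURCE B (Python) =====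
-- def pool_split(pool=(), nums=()):
--     """Group triplets by their match count: compute all match counts in one
--     pass, collect the distinct counts in first-occurrence order, then build
--     each group with a filter pass over the (count, triplet) pairs (no mutable
--     accumulator dict)."""
--     counts = [sum(num in nums for num in triplet) for triplet in pool]
--     keys = dict.fromkeys(counts)
--     return {k: [t for c, t in zip(counts, pool) if c == k] for k in keys}
-- ===== Notes on version B (the rewrite author's own statement) =====
-- stated objective: alternative
-- what changed: Replaces the single-pass defaultdict accumulator with a two-phase grouping: compute all match counts once, dedup them in first-occurrence order, then build each group by a filter pass over the (count, triplet) pairs per key.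
import Mathlib
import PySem

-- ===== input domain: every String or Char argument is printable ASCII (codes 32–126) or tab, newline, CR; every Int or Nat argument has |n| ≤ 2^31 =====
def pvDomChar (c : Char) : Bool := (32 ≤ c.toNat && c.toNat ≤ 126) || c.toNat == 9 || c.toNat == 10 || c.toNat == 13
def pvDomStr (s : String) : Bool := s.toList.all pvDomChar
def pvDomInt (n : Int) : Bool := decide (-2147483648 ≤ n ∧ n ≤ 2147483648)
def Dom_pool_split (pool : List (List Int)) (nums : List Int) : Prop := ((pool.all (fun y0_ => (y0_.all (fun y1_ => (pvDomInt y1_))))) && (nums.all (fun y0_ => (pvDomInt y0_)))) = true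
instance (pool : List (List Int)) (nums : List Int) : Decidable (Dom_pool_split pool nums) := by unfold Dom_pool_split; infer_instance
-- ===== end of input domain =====

-- B replaces A's one-pass defaultdict accumulator with a two-phase grouping
-- (dedup the match-count keys, then one filter pass per key); alternative
-- decomposition, same return value.


-- ===== PORT A =====
-- sum(num in nums for num in triplet)
def nums_matching (triplet : List Int) (nums : List Int) : Int :=
  (triplet.map (fun num => if num ∈ nums then (1 : Int) else 0)).sum

-- defaultdict(list); result[k].append(t) is modify k [] (· ++ [t]); dict(result) = items
def pool_split (pool : List (List Int)) (nums : List Int) : List (Int × List (List Int)) :=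
  (pool.foldl
    (fun (d : PySem.Dict Int (List (List Int))) t =>
      d.modify (nums_matching t nums) [] (fun x => x ++ [t]))
    PySem.Dict.empty).items

-- ===== PORT B =====
-- keys = dict.fromkeys(match counts); then a filter pass over pool per key
def pool_split_alt (pool : List (List Int)) (nums : List Int) : List (Int × List (List Int)) :=
  let counts := pool.map (fun triplet =>
      (triplet.map (fun num => if num ∈ nums then (1 : Int) else 0)).sum)
  (PySem.List.dedup counts).map
    (fun k => (k, ((counts.zip pool).filter (fun p => p.1 == k)).map (fun p => p.2)))

-- ===== PRECONDITION & SPEC =====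
def Spec_pool_split (pool : List (List Int)) (nums : List Int) (out : List (Int × List (List Int))) : Prop := out = pool_split_alt pool nums
instance (pool : List (List Int)) (nums : List Int) (out : List (Int × List (List Int))) : Decidable (Spec_pool_split pool nums out) := by unfold Spec_pool_split; infer_instance

-- ===== CLAIM (what is proved, stated in full; the proofs are below) =====
def Claim_equal_pool_split : Prop := ∀ (pool : List (List Int)) (nums : List Int), Dom_pool_split pool nums → Spec_pool_split pool nums (pool_split pool nums)

-- ===== LEMMAS AND PROOFS =====

theorem zip_map_self {α β : Type} (f : α → β) (l : List α) :
    (l.map f).zip l = l.map (fun x => (f x, x)) := by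
  induction l with
  | nil => rfl
  | cons x xs ih => simp [ih]

theorem pool_split_getD (pool : List (List Int)) (nums : List Int) (k : Int) :
    (pool.foldl
      (fun (d : PySem.Dict Int (List (List Int))) t =>
        d.modify (nums_matching t nums) [] (fun x => x ++ [t]))
      PySem.Dict.empty).getD k []
    = pool.filter (fun t => nums_matching t nums == k) := by
  have h := PySem.Dict.getD_foldl_modify_append
    (pool.map (fun t => (nums_matching t nums, t))) PySem.Dict.empty k
  rw [List.foldl_map] at h
  rw [h]
  simp [Function.comp_def, List.filter_map, List.map_map]

-- ===== VERDICT (by name: the statement is the Claim_ definition above) =====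
theorem pool_split_spec : Claim_equal_pool_split := by
  intro pool nums _
  show pool_split pool nums = pool_split_alt pool nums
  unfold pool_split pool_split_alt
  have hnd : (pool.foldl
      (fun (d : PySem.Dict Int (List (List Int))) t =>
        d.modify (nums_matching t nums) [] (fun x => x ++ [t]))
      PySem.Dict.empty).keys.Nodup :=
    PySem.Dict.nodup_keys_foldl_modify_key pool (fun t => nums_matching t nums) []
      (fun _ t => fun x => x ++ [t]) PySem.Dict.empty (by simp)
  rw [PySem.Dict.items_eq_map_keys _ hnd []]
  rw [PySem.Dict.keys_foldl_modify_key pool (fun t => nums_matching t nums) []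
      (fun _ t => fun x => x ++ [t]) PySem.Dict.empty]
  simp only [PySem.Dict.keys_empty, PySem.Set.update_nil_left,
    PySem.List.dedup_eq_ofList, nums_matching]
  rw [zip_map_self]
  refine List.map_congr_left (fun k _ => ?_)
  have := pool_split_getD pool nums k
  simp only [nums_matching] at this
  rw [this, List.filter_map, List.map_map]
  simp [Function.comp_def, nums_matching]
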